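-- pv_equiv track=rewrite | github.com/smmd/bootcamp_python3 | smmd/semana2/01_tarea_listas_tuplas_fstrings.py | pepepecasOpcionUno
-- ===== SOURCE A (Python) =====
-- def pepepecasOpcionUno(tupla):
--     palabras = ((0, 1, 0, 1), (0, 1, 2, 3, 4), (0, 5, 2, 3), (0, 3, 0, 3, 4))
--
--     trabalenguas = []
--
--     for letras in palabras:
--         palabra = ""
--         for letra in letras:
--             palabra = palabra + tupla[letra]
--         trabalenguas.append(palabra)
--     trabalenguas[::2] = [palabra.upper() for palabra in trabalenguas[::2]]
--
--     return " ".join(trabalenguas + trabalenguas[::-1])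
-- ===== SOURCE B (Python) =====
-- def pepepecasOpcionUno(tupla):
--     patrones = ((0, 1, 0, 1), (0, 1, 2, 3, 4), (0, 5, 2, 3), (0, 3, 0, 3, 4))
--
--     def envolver(i):
--         # Build the mirrored word list recursively: each word wraps the inner ones,
--         # so no reversal pass is ever needed; uppercasing is fused at even depth.
--         if i == len(patrones):
--             return []
--         palabra = "".join(tupla[j] for j in patrones[i])
--         if i % 2 == 0:
--             palabra = palabra.upper()
--         return [palabra] + envolver(i + 1) + [palabra]
--
--     return " ".join(envolver(0))
-- ===== Notes on version B (the rewrite author's own statement) =====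
-- stated objective: alternative
-- what changed: Replaces A's build-four-words loop plus even-slice uppercasing pass plus list-reversal join with a single recursive palindromic construction: each word (uppercased in place at even depth) wraps the recursively built inner list as [w]+inner+[w], so no reversal or mutation pass exists.
import Mathlib
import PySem

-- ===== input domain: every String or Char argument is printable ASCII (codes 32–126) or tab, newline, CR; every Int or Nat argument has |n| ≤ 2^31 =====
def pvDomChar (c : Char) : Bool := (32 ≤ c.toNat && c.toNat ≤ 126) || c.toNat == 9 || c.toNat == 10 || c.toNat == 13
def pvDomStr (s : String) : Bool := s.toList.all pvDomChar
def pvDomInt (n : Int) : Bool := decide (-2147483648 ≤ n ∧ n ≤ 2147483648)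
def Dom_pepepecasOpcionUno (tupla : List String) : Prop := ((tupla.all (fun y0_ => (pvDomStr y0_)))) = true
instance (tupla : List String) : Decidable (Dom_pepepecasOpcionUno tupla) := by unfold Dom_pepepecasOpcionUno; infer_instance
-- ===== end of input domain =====

-- B builds the mirrored word list by recursive palindromic wrapping ([w]+inner+[w], uppercasing
-- fused at even depth), eliminating A's even-slice mutation pass and reversal (objective: alternative).

-- ===== PORT A =====
def pepepecasOpcionUno (tupla : List String) : String :=
  let palabras : List (List Int) := [[0,1,0,1], [0,1,2,3,4], [0,5,2,3], [0,3,0,3,4]]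
  let trabalenguas : List String :=
    palabras.foldl (fun acc letras =>
      acc ++ [letras.foldl (fun palabra letra => palabra ++ PySem.List.pyGetD tupla letra "") ""]) []
  -- trabalenguas[::2] = [p.upper() for p in trabalenguas[::2]]: even positions get uppercased
  let trabalenguas :=
    (PySem.List.enumerate trabalenguas 0).map (fun p => if p.1 % 2 == 0 then PySem.Str.upper p.2 else p.2)
  PySem.Str.join " " (trabalenguas ++ trabalenguas.reverse)

-- ===== PORT B =====
-- envolver(i): recursion over the remaining patterns, carrying the depth i for the parity test
def pvEnvolver (tupla : List String) (i : Int) : List (List Int) → List String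
  | [] => []
  | p :: rest =>
      let palabra := PySem.Str.join "" (p.map (fun j => PySem.List.pyGetD tupla j ""))
      let palabra := if i % 2 == 0 then PySem.Str.upper palabra else palabra
      [palabra] ++ pvEnvolver tupla (i + 1) rest ++ [palabra]

def pepepecasOpcionUno_alt (tupla : List String) : String :=
  let patrones : List (List Int) := [[0,1,0,1], [0,1,2,3,4], [0,5,2,3], [0,3,0,3,4]]
  PySem.Str.join " " (pvEnvolver tupla 0 patrones)

-- ===== PRECONDITION & SPEC =====
-- A (and B) raise IndexError when tupla has fewer than 6 elements (index 5 is used).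
def Pre_pepepecasOpcionUno (tupla : List String) : Prop := 6 ≤ tupla.length
instance (tupla : List String) : Decidable (Pre_pepepecasOpcionUno tupla) := by unfold Pre_pepepecasOpcionUno; infer_instance
def pvWitness_pepepecasOpcionUno : List String := ["pe", "pi", "ca", "ra", "s", "me"]

def Spec_pepepecasOpcionUno (tupla : List String) (out : String) : Prop := out = pepepecasOpcionUno_alt tupla
instance (tupla : List String) (out : String) : Decidable (Spec_pepepecasOpcionUno tupla out) := by unfold Spec_pepepecasOpcionUno; infer_instance

-- ===== CLAIM =====
def Claim_equal_pepepecasOpcionUno : Prop := ∀ (tupla : List String), Dom_pepepecasOpcionUno tupla → Pre_pepepecasOpcionUno tupla → Spec_pepepecasOpcionUno tupla (pepepecasOpcionUno tupla)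

-- ===== LEMMAS AND PROOFS =====

-- ===== VERDICT =====
theorem pepepecasOpcionUno_spec : Claim_equal_pepepecasOpcionUno := by
  intro tupla _ hpre
  unfold Pre_pepepecasOpcionUno at hpre
  obtain ⟨a, b, c, d, e, f, rest, rfl⟩ :
      ∃ a b c d e f rest, tupla = a :: b :: c :: d :: e :: f :: rest := by
    match tupla, hpre with
    | a :: b :: c :: d :: e :: f :: rest, _ => exact ⟨a, b, c, d, e, f, rest, rfl⟩
  show pepepecasOpcionUno _ = pepepecasOpcionUno_alt _
  simp [pepepecasOpcionUno, pepepecasOpcionUno_alt, pvEnvolver, PySem.List.enumerate,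
        PySem.List.pyGetD_ofNat', PySem.Str.join, PySem.Chars.join, List.intercalate]
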